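-- pv_equiv track=rewrite | github.com/MBAlbornoz/AtrapameSiPuedes | funcionesVACIAS.py | Puntos
-- ===== SOURCE A (Python) =====
-- def esValida(palabra, listaPalabras):
--     if palabra in listaPalabras:
--         return True
--     else:
--         return False
--
-- def Puntos(palabra,listaPalabras):
--     vocal="aeiou"
--     cons_facil="bdfghlmnprstv"
--     cons_dif="jkqwxyz"
--     puntaje=0
--     if esValida(palabra,listaPalabras):
--         for i in palabra:
--             if i in vocal:
--                 puntaje+=1
--             if i in cons_facil:
--                 puntaje+=2
--             if i in cons_dif:
--                 puntaje+=5
--     return puntaje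
-- ===== SOURCE B (Python) =====
-- def Puntos(palabra, listaPalabras):
--     # Inverted traversal: instead of scanning the word once testing each character
--     # against three alphabets, scan the fixed 25-letter alphabet and add
--     # weight * (occurrences of that letter in the word).  Order of summation
--     # does not matter because the score is a sum of independent per-letter
--     # contributions.
--     if palabra not in listaPalabras:
--         return 0
--     total = 0
--     for peso, letras in ((1, "aeiou"), (2, "bdfghlmnprstv"), (5, "jkqwxyz")):
--         for c in letras:
--             total += peso * palabra.count(c)
--     return total
-- ===== Notes on version B (the rewrite author's own statement) =====
-- stated objective: alternative
-- what changed: Inverts the traversal: instead of one pass over the word with three per-character membership tests, B loops over the fixed 25-letter weighted alphabet and adds weight * palabra.count(letter), justified because the score is a sum of independent per-letter contributions.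
import Mathlib
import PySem

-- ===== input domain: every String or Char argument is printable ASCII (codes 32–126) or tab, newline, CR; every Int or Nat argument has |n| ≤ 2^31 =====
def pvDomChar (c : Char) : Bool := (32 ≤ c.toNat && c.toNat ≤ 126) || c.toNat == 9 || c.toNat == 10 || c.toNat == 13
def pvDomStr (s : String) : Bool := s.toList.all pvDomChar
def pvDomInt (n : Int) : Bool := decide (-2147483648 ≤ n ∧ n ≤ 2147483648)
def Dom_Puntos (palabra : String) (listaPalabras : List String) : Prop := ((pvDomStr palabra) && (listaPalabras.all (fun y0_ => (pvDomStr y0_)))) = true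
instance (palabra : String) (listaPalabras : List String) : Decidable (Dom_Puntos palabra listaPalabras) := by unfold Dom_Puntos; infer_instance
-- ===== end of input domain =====

-- B inverts the traversal: instead of A's single pass over the word with three per-character
-- membership tests, B iterates over the fixed weighted alphabet and adds
-- weight * (count of that letter in the word) — a different traversal (objective: alternative).

-- ===== PORT A =====
-- the chars of A's string constants vocal = "aeiou", cons_facil = "bdfghlmnprstv", cons_dif = "jkqwxyz"
-- ('i in vocal' on the 1-char loop variable i is exactly char membership in these chars)
def vocalA : List Char := ['a','e','i','o','u']
def consFacilA : List Char := ['b','d','f','g','h','l','m','n','p','r','s','t','v']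
def consDifA : List Char := ['j','k','q','w','x','y','z']

def esValida (palabra : String) (listaPalabras : List String) : Bool :=
  if listaPalabras.contains palabra then true else false

def Puntos (palabra : String) (listaPalabras : List String) : Int :=
  -- puntaje = 0; if esValida: for i in palabra: three independent ifs, each adding to puntaje
  if esValida palabra listaPalabras then
    palabra.toList.foldl (fun puntaje i =>
      let p1 := if vocalA.contains i then puntaje + 1 else puntaje
      let p2 := if consFacilA.contains i then p1 + 2 else p1
      if consDifA.contains i then p2 + 5 else p2) 0
  else 0

-- ===== PORT B =====
-- Source B's tuple of (peso, letras) groups; letras as their char lists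
def gruposB : List (Int × List Char) :=
  [(1, ['a','e','i','o','u']),
   (2, ['b','d','f','g','h','l','m','n','p','r','s','t','v']),
   (5, ['j','k','q','w','x','y','z'])]

def Puntos_alt (palabra : String) (listaPalabras : List String) : Int :=
  if !(listaPalabras.contains palabra) then 0
  else
    -- nested for-loops: total += peso * palabra.count(c)
    -- (Python str.count with a 1-character needle counts occurrences of that character,
    --  which is exactly List.count on the char list: exact here)
    gruposB.foldl (fun total pl =>
      pl.2.foldl (fun t c => t + pl.1 * (palabra.toList.count c : Int)) total) 0

-- ===== PRECONDITION & SPEC =====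
def Spec_Puntos (palabra : String) (listaPalabras : List String) (out : Int) : Prop := out = Puntos_alt palabra listaPalabras
instance (palabra : String) (listaPalabras : List String) (out : Int) : Decidable (Spec_Puntos palabra listaPalabras out) := by unfold Spec_Puntos; infer_instance

-- ===== CLAIM (what is proved, stated in full; the proofs are below) =====
def Claim_equal_Puntos : Prop := ∀ (palabra : String) (listaPalabras : List String), Dom_Puntos palabra listaPalabras → Spec_Puntos palabra listaPalabras (Puntos palabra listaPalabras)

-- ===== LEMMAS AND PROOFS =====

-- group sum: Σ_{c ∈ S} count c l, as B accumulates it per group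
def grpSum (S : List Char) (l : List Char) : Int :=
  (S.map (fun c => (l.count c : Int))).sum

-- over a duplicate-free group, the indicator sum of one character x collapses to membership
theorem sum_indicator (S : List Char) (hnd : S.Nodup) (x : Char) :
    (S.map (fun c => if x = c then (1:Int) else 0)).sum = if S.contains x then 1 else 0 := by
  induction S with
  | nil => simp
  | cons s t ih =>
    rcases List.nodup_cons.mp hnd with ⟨hs, ht⟩
    by_cases hx : x = s
    · subst hx
      have : (t.map (fun c => if x = c then (1:Int) else 0)).sum = 0 := by
        apply List.sum_eq_zero; intro y hy
        rcases List.mem_map.mp hy with ⟨c, hc, rfl⟩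
        have hne : x ≠ c := fun h => hs (h ▸ hc)
        simp [hne]
      simp [this]
    · simp [hx, ih ht]

theorem grpSum_cons (S : List Char) (hnd : S.Nodup) (x : Char) (t : List Char) :
    grpSum S (x :: t) = grpSum S t + (if S.contains x then 1 else 0) := by
  unfold grpSum
  have : ∀ c : Char, ((x :: t).count c : Int) = (t.count c : Int) + (if x = c then 1 else 0) := by
    intro c; by_cases h : x = c <;> simp [h]
  calc (S.map (fun c => ((x :: t).count c : Int))).sum
      = (S.map (fun c => (t.count c : Int) + (if x = c then 1 else 0))).sum := by
        apply congrArg; exact List.map_congr_left (fun c _ => this c)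
    _ = (S.map (fun c => (t.count c : Int))).sum
        + (S.map (fun c => if x = c then (1:Int) else 0)).sum := by
        rw [← List.sum_map_add]
    _ = grpSum S t + (if S.contains x then 1 else 0) := by
        rw [sum_indicator S hnd x]; rfl

-- A's accumulating loop computes the start value plus the three weighted group sums
theorem loopA_eq (l : List Char) (a : Int) :
    l.foldl (fun puntaje i =>
      let p1 := if vocalA.contains i then puntaje + 1 else puntaje
      let p2 := if consFacilA.contains i then p1 + 2 else p1
      if consDifA.contains i then p2 + 5 else p2) a
    = a + grpSum vocalA l + 2 * grpSum consFacilA l + 5 * grpSum consDifA l := by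
  induction l generalizing a with
  | nil => simp [grpSum]
  | cons x t ih =>
    rw [List.foldl_cons, ih,
        grpSum_cons vocalA (by decide) x t,
        grpSum_cons consFacilA (by decide) x t,
        grpSum_cons consDifA (by decide) x t]
    split_ifs <;> ring

-- B's nested fold over the groups is exactly the three weighted group sums
theorem loopB_eq (l : List Char) :
    gruposB.foldl (fun total pl =>
      pl.2.foldl (fun t c => t + pl.1 * (l.count c : Int)) total) 0
    = grpSum vocalA l + 2 * grpSum consFacilA l + 5 * grpSum consDifA l := by
  simp [gruposB, grpSum, vocalA, consFacilA, consDifA, List.foldl]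
  ring

theorem Puntos_spec : Claim_equal_Puntos := by
  unfold Claim_equal_Puntos Spec_Puntos Puntos Puntos_alt esValida
  intro palabra listaPalabras _
  by_cases h : listaPalabras.contains palabra
  · simp only [h, if_true, Bool.not_true, Bool.false_eq_true, if_false]
    rw [loopA_eq palabra.toList 0, loopB_eq palabra.toList]; ring
  · have h' : palabra ∉ listaPalabras := by simpa using h
    simp [h']
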